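-- pv_equiv track=rewrite | github.com/RAPosthumus/sheaf-locality | debruijn_research_grade/debruijn_sheaf_visualizer.py | kernel_endpoint
-- ===== SOURCE A (Python) =====
-- def K_even(s: str) -> str:
--     n = len(s)
--     if n % 2:
--         raise ValueError("K_even requires even length")
--     m = n // 2
--     return s[1:m+1] + s[m-1:n-1]
--
-- def kernel_endpoint(s: str) -> str:
--     seen = set()
--     cur = s
--     seq = []
--     while cur not in seen:
--         seen.add(cur)
--         seq.append(cur)
--         cur = K_even(cur)
--     start = seq.index(cur)
--     cyc = seq[start:]
--     if len(cyc) == 1: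
--         return cyc[0]
--     return "<->".join(sorted(cyc))
-- ===== SOURCE B (Python) =====
-- def kernel_endpoint(s: str) -> str:
--     n = len(s)
--     if n % 2:
--         raise ValueError("K_even requires even length")
--     if n == 0:
--         return ""
--     m = n // 2
--     a, b = s[m - 1], s[m]
--     if a == b:
--         return a * n
--     x = (b + a) * m
--     y = (a + b) * m
--     return "<->".join(sorted([x, y]))
-- ===== Notes on version B (the rewrite author's own statement) =====
-- stated objective: faster
-- what changed: B replaces the iterate-and-store-until-repeat simulation by a closed form: K_even shifts every position toward the two middle characters s[m-1], s[m], so the limit cycle is the constant string (if they are equal) or the two alternating strings built from them, computed directly in O(n).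
import Mathlib
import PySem

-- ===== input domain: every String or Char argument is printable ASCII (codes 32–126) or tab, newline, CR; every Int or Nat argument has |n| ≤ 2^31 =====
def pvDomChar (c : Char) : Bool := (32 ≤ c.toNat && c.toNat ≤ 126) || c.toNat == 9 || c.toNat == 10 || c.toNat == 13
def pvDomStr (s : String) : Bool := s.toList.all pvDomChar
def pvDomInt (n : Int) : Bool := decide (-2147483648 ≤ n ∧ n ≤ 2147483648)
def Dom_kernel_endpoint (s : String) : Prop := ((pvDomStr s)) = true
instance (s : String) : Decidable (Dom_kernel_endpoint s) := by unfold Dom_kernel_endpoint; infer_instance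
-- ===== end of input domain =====

-- B replaces A's iterate-and-store-until-repeat simulation by a closed form built from the
-- two middle characters (the limit cycle of K_even); proved equal on even-length strings
-- (A raises ValueError on odd length, excluded by Pre_).


-- ===== PORT A =====
-- K_even(s): raises (none) on odd length, else s[1:m+1] + s[m-1:n-1]  (on code-point lists)
def pvK? (l : List Char) : Option (List Char) :=
  let n : Int := l.length
  if PySem.Int.mod n 2 ≠ 0 then none
  else
    let m := PySem.Int.floordiv n 2
    some (PySem.List.slice l (some 1) (some (m + 1)) ++
          PySem.List.slice l (some (m - 1)) (some (n - 1)))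

-- start = seq.index(cur); cyc = seq[start:]; return cyc[0] or "<->".join(sorted(cyc))
def pvFinish (seq : List (List Char)) (cur : List Char) : Option (List Char) :=
  match PySem.List.index? seq cur with
  | none => none
  | some start =>
      let cyc := PySem.List.slice seq (some (start : Int)) none
      if cyc.length = 1 then some ((PySem.List.pyGet? cyc 0).getD [])
      else some (PySem.Chars.join ['<', '-', '>'] (PySem.List.sorted cyc (fun z => z) false))

-- the 'while cur not in seen' loop; fuel only makes it total (never exhausted under Pre_)
def pvLoopA : Nat → PySem.Set (List Char) → List (List Char) → List Char → Option (List Char)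
  | 0, _, _, _ => none
  | fuel + 1, seen, seq, cur =>
    if PySem.Set.contains seen cur then pvFinish seq cur
    else
      match pvK? cur with
      | none => none
      | some nxt => pvLoopA fuel (PySem.Set.add seen cur) (seq ++ [cur]) nxt

def kernel_endpoint (s : String) : String :=
  match pvLoopA (s.toList.length + 3) PySem.Set.empty [] s.toList with
  | some r => String.ofList r
  | none => ""   -- fuel exhaustion / ValueError: unreachable under Pre_

-- ===== PORT B =====
def kernel_endpoint_alt (s : String) : String :=
  let l := s.toList
  let n := l.length
  if n % 2 = 1 then ""           -- Source B raises ValueError here (outside Pre_)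
  else if n = 0 then ""
  else
    let m := n / 2
    let a := l.getD (m - 1) ' '
    let b := l.getD m ' '
    if a = b then String.ofList (List.replicate n a)
    else
      let x := PySem.List.pyRepeat [b, a] (m : Int)
      let y := PySem.List.pyRepeat [a, b] (m : Int)
      String.ofList (PySem.Chars.join ['<', '-', '>']
        (PySem.List.sorted [x, y] (fun z => z) false))

-- ===== PRECONDITION & SPEC =====
-- Pre_ excludes exactly the odd-length strings, on which A's first K_even call raises ValueError.
def Pre_kernel_endpoint (s : String) : Prop := s.toList.length % 2 = 0
instance (s : String) : Decidable (Pre_kernel_endpoint s) := by unfold Pre_kernel_endpoint; infer_instance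

def pvWitness_kernel_endpoint : String := "ab"

def Spec_kernel_endpoint (s : String) (out : String) : Prop := out = kernel_endpoint_alt s
instance (s : String) (out : String) : Decidable (Spec_kernel_endpoint s out) := by unfold Spec_kernel_endpoint; infer_instance

-- ===== CLAIM (what is proved, stated in full; the proofs are below) =====
def Claim_equal_kernel_endpoint : Prop := ∀ (s : String), Dom_kernel_endpoint s → Pre_kernel_endpoint s → Spec_kernel_endpoint s (kernel_endpoint s)

-- ===== LEMMAS AND PROOFS =====

-- total one-step function equal to pvK? on even length
def pvSt (l : List Char) : List Char :=
  ((l.drop 1).take (l.length / 2)) ++ ((l.drop (l.length / 2 - 1)).take (l.length / 2))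

def pvS (l : List Char) : Nat → List Char
  | 0 => l
  | k + 1 => pvSt (pvS l k)

-- index dynamics: position i of the new string reads position pvF m i of the old one
def pvF (m i : Nat) : Nat := if i < m then i + 1 else i - 1

def pvG (m k i : Nat) : Nat :=
  if i + k < m then i + k
  else if m + k <= i then i - k
  else (if (k + i + m) % 2 = 0 then m else m - 1)

def pvAlt (x y : Char) (n : Nat) : List Char :=
  (List.range n).map (fun i => if i % 2 = 0 then x else y)

def pvSeq (l : List Char) (k : Nat) : List (List Char) := (List.range k).map (pvS l)

lemma pvK?_eq (l : List Char) (m : Nat) (h : l.length = 2 * m) : pvK? l = some (pvSt l) := by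
  rcases Nat.eq_zero_or_pos m with hm | hm
  · subst hm
    have : l = [] := List.length_eq_zero_iff.mp (by omega)
    subst this; rfl
  · simp only [pvK?, pvSt, h]
    have hmod : PySem.Int.mod ((2 * m : Nat) : Int) 2 = 0 := by
      simp
    have hdiv : PySem.Int.floordiv ((2 * m : Nat) : Int) 2 = (m : Int) := by
      simp
    have c1 : ((m : Int) + 1) = ((m + 1 : Nat) : Int) := by push_cast; ring
    have c2 : ((m : Int) - 1) = ((m - 1 : Nat) : Int) := by omega
    have c3 : (((2 * m : Nat) : Int) - 1) = ((2 * m - 1 : Nat) : Int) := by omega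
    rw [hmod, hdiv]
    simp only [c1, c2, c3]
    have s1 : PySem.List.slice l (some ((1:Nat):Int)) (some ((m + 1 : Nat) : Int)) = (l.drop 1).take m := by
      rw [PySem.List.slice_natCast, Nat.add_sub_cancel]
    have s2 : PySem.List.slice l (some ((m - 1 : Nat) : Int)) (some ((2 * m - 1 : Nat) : Int)) = (l.drop (m - 1)).take m := by
      rw [PySem.List.slice_natCast]
      congr 1
      omega
    have e1 : ((1:Nat):Int) = (1:Int) := by norm_num
    rw [← e1] at *
    simp only [s1, s2]
    have : (2 * m) / 2 = m := by omega
    simp [this]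

lemma length_pvSt (l : List Char) (m : Nat) (h : l.length = 2 * m) : (pvSt l).length = 2 * m := by
  simp [pvSt, h]; omega

lemma pvSt_getD (l : List Char) (m : Nat) (h : l.length = 2 * m) (hm : 1 <= m)
    (i : Nat) (hi : i < 2 * m) :
    (pvSt l).getD i ' ' = l.getD (pvF m i) ' ' := by
  have h1 : ((l.drop 1).take (l.length / 2)).length = m := by simp [h]; omega
  by_cases hc : i < m
  · rw [pvSt, List.getD_eq_getElem?_getD, List.getElem?_append_left (by omega),
      List.getElem?_take_of_lt (by omega), List.getElem?_drop]
    simp [pvF, hc, List.getD_eq_getElem?_getD, Nat.add_comm]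
  · rw [pvSt, List.getD_eq_getElem?_getD, List.getElem?_append_right (by omega),
      List.getElem?_take_of_lt (by omega), List.getElem?_drop]
    have : l.length / 2 - 1 + (i - ((l.drop 1).take (l.length / 2)).length) = i - 1 := by
      simp [h]; omega
    rw [this]
    simp [pvF, hc, List.getD_eq_getElem?_getD]

lemma length_pvS (l : List Char) (m : Nat) (h : l.length = 2 * m) (k : Nat) :
    (pvS l k).length = 2 * m := by
  induction k with
  | zero => exact h
  | succ k ih => exact length_pvSt _ _ ih

lemma pvG_zero (m i : Nat) (_hi : i < 2 * m) : pvG m 0 i = i := by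
  unfold pvG; split_ifs <;> omega

lemma pvG_succ (m k i : Nat) (hm : 1 <= m) (hi : i < 2 * m) :
    pvG m (k + 1) i = pvG m k (pvF m i) := by
  unfold pvG pvF; split_ifs <;> omega

lemma pvF_lt (m i : Nat) (_hm : 1 <= m) (hi : i < 2 * m) : pvF m i < 2 * m := by
  unfold pvF; split_ifs <;> omega

lemma pvS_getD (l : List Char) (m : Nat) (h : l.length = 2 * m) (hm : 1 <= m) (k : Nat) :
    ∀ i, i < 2 * m → (pvS l k).getD i ' ' = l.getD (pvG m k i) ' ' := by
  induction k with
  | zero => intro i hi; rw [pvG_zero m i hi]; rfl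
  | succ k ih =>
    intro i hi
    have : (pvS l (k+1)).getD i ' ' = (pvS l k).getD (pvF m i) ' ' :=
      pvSt_getD (pvS l k) m (length_pvS l m h k) hm i hi
    rw [this, ih (pvF m i) (pvF_lt m i hm hi), pvG_succ m k i hm hi]

lemma pvG_self (m i : Nat) (hm : 1 <= m) (hi : i < 2 * m) :
    pvG m m i = if i % 2 = 0 then m else m - 1 := by
  unfold pvG; split_ifs <;> omega

lemma pvAlt_length (x y : Char) (n : Nat) : (pvAlt x y n).length = n := by simp [pvAlt]

lemma pvAlt_getD (x y : Char) (n i : Nat) (hi : i < n) :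
    (pvAlt x y n).getD i ' ' = if i % 2 = 0 then x else y := by
  simp [pvAlt, List.getD_eq_getElem?_getD, hi]

lemma getD_ext (l₁ l₂ : List Char) (h : l₁.length = l₂.length)
    (h2 : ∀ i, i < l₁.length → l₁.getD i ' ' = l₂.getD i ' ') : l₁ = l₂ := by
  apply List.ext_getElem h
  intro i h1 h1'
  have := h2 i h1
  rwa [List.getD_eq_getElem _ _ h1, List.getD_eq_getElem _ _ h1'] at this

lemma pvS_mid (l : List Char) (m : Nat) (h : l.length = 2 * m) (hm : 1 <= m) :
    pvS l m = pvAlt (l.getD m ' ') (l.getD (m - 1) ' ') (2 * m) := by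
  apply getD_ext
  · rw [length_pvS l m h m, pvAlt_length]
  · intro i hi
    rw [length_pvS l m h m] at hi
    rw [pvS_getD l m h hm m i hi, pvG_self m i hm hi, pvAlt_getD _ _ _ i hi]
    split_ifs <;> rfl

lemma pvSt_alt (x y : Char) (m : Nat) (hm : 1 <= m) :
    pvSt (pvAlt x y (2 * m)) = pvAlt y x (2 * m) := by
  apply getD_ext
  · rw [length_pvSt _ m (pvAlt_length x y (2*m)), pvAlt_length]
  · intro i hi
    rw [length_pvSt _ m (pvAlt_length x y (2*m))] at hi
    rw [pvSt_getD _ m (pvAlt_length x y (2*m)) hm i hi,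
        pvAlt_getD _ _ _ _ (pvF_lt m i hm hi), pvAlt_getD _ _ _ i hi]
    unfold pvF
    split_ifs <;> first | rfl | omega

lemma pvS_add (l : List Char) (k t : Nat) : pvS l (k + t) = pvS (pvS l k) t := by
  induction t with
  | zero => rfl
  | succ t ih => rw [← Nat.add_assoc]; show pvSt _ = pvSt _; rw [ih]

lemma pvS_after (l : List Char) (m : Nat) (h : l.length = 2 * m) (hm : 1 <= m) (t : Nat) :
    pvS l (m + t) = (if t % 2 = 0 then pvAlt (l.getD m ' ') (l.getD (m - 1) ' ') (2 * m)
                     else pvAlt (l.getD (m - 1) ' ') (l.getD m ' ') (2 * m)) := by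
  induction t with
  | zero => simpa using pvS_mid l m h hm
  | succ t ih =>
    have : pvS l (m + (t + 1)) = pvSt (pvS l (m + t)) := by rfl
    rw [this, ih]
    rcases Nat.even_or_odd t with he | ho
    · have h0 : t % 2 = 0 := Nat.even_iff.mp he
      have h1 : (t + 1) % 2 = 1 := by omega
      simp [h0, h1, pvSt_alt _ _ m hm]
    · have h0 : t % 2 = 1 := Nat.odd_iff.mp ho
      have h1 : (t + 1) % 2 = 0 := by omega
      simp [h0, h1, pvSt_alt _ _ m hm]

lemma pvS_congr (l : List Char) (i i' : Nat) (h : pvS l i = pvS l i') (u : Nat) :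
    pvS l (i + u) = pvS l (i' + u) := by
  rw [pvS_add, pvS_add, h]

lemma pvAlt_self (x : Char) (n : Nat) : pvAlt x x n = List.replicate n x := by
  simp [pvAlt]

lemma pvAlt_cons2 (x y : Char) (n : Nat) : pvAlt x y (n + 2) = x :: y :: pvAlt x y n := by
  apply getD_ext
  · simp [pvAlt_length]
  · intro i hi
    rw [pvAlt_length] at hi
    match i with
    | 0 => rw [pvAlt_getD _ _ _ 0 (by omega)]; rfl
    | 1 => rw [pvAlt_getD _ _ _ 1 (by omega)]; rfl
    | (i + 2) =>
      rw [pvAlt_getD _ _ _ _ hi]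
      show _ = (pvAlt x y n).getD i ' '
      rw [pvAlt_getD _ _ _ i (by omega)]
      have : (i + 2) % 2 = i % 2 := by omega
      rw [this]

lemma pyRepeat_alt (x y : Char) (m : Nat) :
    PySem.List.pyRepeat [x, y] (m : Int) = pvAlt x y (2 * m) := by
  induction m with
  | zero => rfl
  | succ m ih =>
    have e : 2 * (m + 1) = 2 * m + 2 := by ring
    rw [e, pvAlt_cons2, ← ih]
    simp [PySem.List.pyRepeat, List.replicate_succ]

lemma sorted_pair (u v : List Char) :
    PySem.List.sorted [u, v] (fun z => z) false = if v < u then [v, u] else [u, v] := by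
  simp [PySem.List.sorted_eq_foldl_insertBy, PySem.List.insertBy]

lemma sorted_pair_comm (u v : List Char) (h : u ≠ v) :
    PySem.List.sorted [u, v] (fun z => z) false = PySem.List.sorted [v, u] (fun z => z) false := by
  rw [sorted_pair, sorted_pair]
  rcases lt_trichotomy u v with h1 | h1 | h1
  · rw [if_neg (asymm h1), if_pos h1]
  · exact absurd h1 h
  · rw [if_pos h1, if_neg (asymm h1)]

lemma pair_list (X Y : List Char) (c : List (List Char)) (hnd : c.Nodup)
    (hsub : ∀ z ∈ c, z = X ∨ z = Y) (hX : X ∈ c) (hY : Y ∈ c) (hXY : X ≠ Y) :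
    c = [X, Y] ∨ c = [Y, X] := by
  rcases c with _ | ⟨z1, c1⟩
  · cases hX
  rcases c1 with _ | ⟨z2, c2⟩
  · simp only [List.mem_singleton] at hX hY
    exact absurd (hX.trans hY.symm) hXY
  rcases c2 with _ | ⟨z3, c3⟩
  · have h1 := hsub z1 (by simp)
    have h2 := hsub z2 (by simp)
    have hne : z1 ≠ z2 := by
      intro hcontra
      simp [hcontra] at hnd
    rcases h1 with rfl | rfl <;> rcases h2 with rfl | rfl <;> simp_all
  · have h1 := hsub z1 (by simp)
    have h2 := hsub z2 (by simp)
    have h3 := hsub z3 (by simp)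
    have h12 : z1 ≠ z2 := by intro hc; simp [hc] at hnd
    have h13 : z1 ≠ z3 := by intro hc; simp [hc] at hnd
    have h23 : z2 ≠ z3 := by intro hc; simp [hc] at hnd
    rcases h1 with rfl | rfl <;> rcases h2 with rfl | rfl <;> rcases h3 with rfl | rfl <;> simp_all

lemma ofList_append_singleton (xs : List (List Char)) (x : List Char) :
    PySem.Set.ofList (xs ++ [x]) = PySem.Set.add (PySem.Set.ofList xs) x := by
  rw [PySem.Set.ofList_eq_foldl, PySem.Set.ofList_eq_foldl, List.foldl_append]; rfl

lemma pvLoop_run (l : List Char) (m j : Nat) (h : l.length = 2 * m)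
    (hmin : ∀ k, k < j → ¬ ∃ i, i < k ∧ pvS l i = pvS l k)
    (hj : ∃ i, i < j ∧ pvS l i = pvS l j) :
    ∀ d k fuel, k + d = j → d < fuel →
      pvLoopA fuel (PySem.Set.ofList (pvSeq l k)) (pvSeq l k) (pvS l k)
        = pvFinish (pvSeq l j) (pvS l j) := by
  intro d
  induction d with
  | zero =>
    intro k fuel hk hf
    obtain ⟨f', rfl⟩ : ∃ f', fuel = f' + 1 := ⟨fuel - 1, by omega⟩
    have hkj : k = j := by omega
    subst hkj
    have hmem : pvS l k ∈ pvSeq l k := by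
      obtain ⟨i, hi, he⟩ := hj
      exact List.mem_map.mpr ⟨i, List.mem_range.mpr hi, he⟩
    rw [pvLoopA]
    simp [PySem.Set.contains, PySem.Set.mem_ofList, hmem]
  | succ d ih =>
    intro k fuel hk hf
    obtain ⟨f', rfl⟩ : ∃ f', fuel = f' + 1 := ⟨fuel - 1, by omega⟩
    have hklt : k < j := by omega
    have hnmem : pvS l k ∉ pvSeq l k := by
      intro hmem
      apply hmin k hklt
      obtain ⟨i, hir, he⟩ := List.mem_map.mp hmem
      exact ⟨i, List.mem_range.mp hir, he⟩
    have hK : pvK? (pvS l k) = some (pvS l (k + 1)) := pvK?_eq _ m (length_pvS l m h k)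
    have hseq : pvSeq l k ++ [pvS l k] = pvSeq l (k + 1) := by
      simp [pvSeq, List.range_succ]
    rw [pvLoopA]
    rw [if_neg (by simp [PySem.Set.contains, PySem.Set.mem_ofList, hnmem])]
    rw [hK]
    show pvLoopA f' (PySem.Set.add (PySem.Set.ofList (pvSeq l k)) (pvS l k)) (pvSeq l k ++ [pvS l k]) (pvS l (k + 1)) = _
    rw [← ofList_append_singleton, hseq]
    exact ih (k + 1) f' (by omega) (by omega)

lemma pvFinish_some (seq : List (List Char)) (cur : List Char) (st : Nat)
    (h : PySem.List.index? seq cur = some st) :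
    pvFinish seq cur =
      (if (PySem.List.slice seq (some (st : Int)) none).length = 1
       then some ((PySem.List.pyGet? (PySem.List.slice seq (some (st : Int)) none) 0).getD [])
       else some (PySem.Chars.join ['<','-','>']
         (PySem.List.sorted (PySem.List.slice seq (some (st : Int)) none) (fun z => z) false))) := by
  unfold pvFinish
  rw [h]

-- ===== VERDICT (by name: the statement is the Claim_ definition above) =====
theorem kernel_endpoint_spec : Claim_equal_kernel_endpoint := by
  intro s _ hPre
  show kernel_endpoint s = kernel_endpoint_alt s
  have hPre' : s.toList.length % 2 = 0 := hPre
  obtain ⟨m, hm⟩ : ∃ m, s.toList.length = 2 * m := ⟨s.toList.length / 2, by omega⟩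
  set l := s.toList with hl
  rcases Nat.eq_zero_or_pos m with hm0 | hm1
  · -- empty string
    have hnil : l = [] := List.length_eq_zero_iff.mp (by omega)
    simp only [kernel_endpoint, kernel_endpoint_alt, ← hl, hnil]
    rfl
  · set a := l.getD (m - 1) ' ' with ha
    set b := l.getD m ' ' with hb
    set X := pvAlt b a (2 * m) with hX
    set Y := pvAlt a b (2 * m) with hY
    have hafter : ∀ t, pvS l (m + t) = if t % 2 = 0 then X else Y := fun t =>
      pvS_after l m hm hm1 t
    have h0X : pvS l m = X := by have := hafter 0; simpa using this
    have h2X : pvS l (m + 2) = X := by have := hafter 2; simpa using this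
    have hQ : ∃ i, i < m + 2 ∧ pvS l i = pvS l (m + 2) := ⟨m, by omega, by rw [h0X, h2X]⟩
    have hexists : ∃ k, ∃ i, i < k ∧ pvS l i = pvS l k := ⟨m + 2, hQ⟩
    haveI hdec : DecidablePred (fun k => ∃ i, i < k ∧ pvS l i = pvS l k) := fun k =>
      decidable_of_iff (pvS l k ∈ (List.range k).map (pvS l))
        (by simp [List.mem_map, List.mem_range])
    set j := Nat.find hexists with hjdef
    have hjspec : ∃ i, i < j ∧ pvS l i = pvS l j := Nat.find_spec hexists
    have hjle : j ≤ m + 2 := Nat.find_min' hexists hQ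
    have hmin : ∀ k, k < j → ¬ ∃ i, i < k ∧ pvS l i = pvS l k := fun k hk =>
      Nat.find_min hexists hk
    have hmemj : pvS l j ∈ pvSeq l j := by
      obtain ⟨i, hi, he⟩ := hjspec
      exact List.mem_map.mpr ⟨i, List.mem_range.mpr hi, he⟩
    obtain ⟨st, hst⟩ : ∃ st, PySem.List.index? (pvSeq l j) (pvS l j) = some st :=
      Option.isSome_iff_exists.mp ((PySem.List.index?_isSome_iff _ _).mpr hmemj)
    obtain ⟨hstlen, hstget, hstfirst⟩ := PySem.List.getElem_of_index?_eq_some hst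
    have hseqlen : (pvSeq l j).length = j := by simp [pvSeq]
    have hstlt : st < j := by rwa [hseqlen] at hstlen
    have hSst : pvS l st = pvS l j := by
      have he : (pvSeq l j)[st]'hstlen = pvS l st := by simp [pvSeq]
      rw [← he]; exact hstget
    set p := j - st with hp
    have hp1 : 1 ≤ p := by omega
    have hperiod : pvS l (st + p) = pvS l st := by
      have e : st + p = j := by omega
      rw [e, hSst]
    have key : ∀ u t, pvS l (st + (u + t * p)) = pvS l (st + u) := by
      intro u t
      induction t with
      | zero => simp
      | succ t ih =>
        have e : u + (t + 1) * p = p + (u + t * p) := by ring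
        rw [e, ← Nat.add_assoc, pvS_congr l (st + p) st hperiod (u + t * p)]
        exact ih
    set cycL := (List.range' st p).map (pvS l) with hcycL
    have hmemcyc : ∀ t, pvS l (st + t) ∈ cycL := by
      intro t
      have h1 : pvS l (st + t) = pvS l (st + t % p) := by
        have e : st + t = st + (t % p + (t / p) * p) := by rw [Nat.mod_add_div']
        rw [e, key]
      rw [h1]
      exact List.mem_map.mpr ⟨st + t % p,
        List.mem_range'_1.mpr ⟨Nat.le_add_right _ _,
          by have := Nat.mod_lt t (by omega : 0 < p); omega⟩, rfl⟩
    have hsub : ∀ z ∈ cycL, z = X ∨ z = Y := by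
      intro z hz
      obtain ⟨i, hir, rfl⟩ := List.mem_map.mp hz
      obtain ⟨hi1, hi2⟩ := List.mem_range'_1.mp hir
      have h2 : pvS l i = pvS l (i + m * p) := by
        have hk := key (i - st) m
        have e1 : st + (i - st) = i := by omega
        have e2 : st + (i - st + m * p) = i + m * p := by omega
        rw [e1, e2] at hk
        exact hk.symm
      have hmp : m * 1 ≤ m * p := Nat.mul_le_mul_left m hp1
      have e3 : i + m * p = m + (i + m * p - m) := by omega
      rw [h2, e3, hafter]
      split_ifs
      · exact Or.inl rfl
      · exact Or.inr rfl
    have hXmem : X ∈ cycL := by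
      have hx : pvS l (m + 2 * st) = X := by
        rw [hafter]; simp [Nat.mul_mod_right]
      have e : m + 2 * st = st + (m + st) := by omega
      rw [← hx, e]; exact hmemcyc (m + st)
    have hYmem : Y ∈ cycL := by
      have hpar : (2 * st + 1) % 2 = 1 := by omega
      have hy : pvS l (m + (2 * st + 1)) = Y := by rw [hafter, hpar]; simp
      have e : m + (2 * st + 1) = st + (m + st + 1) := by omega
      rw [← hy, e]; exact hmemcyc (m + st + 1)
    have hnodup : cycL.Nodup := by
      apply List.Nodup.map_on _ List.nodup_range'
      intro x hx y hy hxy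
      obtain ⟨hx1, hx2⟩ := List.mem_range'_1.mp hx
      obtain ⟨hy1, hy2⟩ := List.mem_range'_1.mp hy
      by_contra hne
      rcases Nat.lt_or_ge x y with hlt | hge
      · exact hmin y (by omega) ⟨x, hlt, hxy⟩
      · exact hmin x (by omega) ⟨y, by omega, hxy.symm⟩
    have hrun : pvLoopA (l.length + 3) PySem.Set.empty [] l
        = pvFinish (pvSeq l j) (pvS l j) := by
      have h0 : pvSeq l 0 = [] := by simp [pvSeq]
      have hr := pvLoop_run l m j hm hmin hjspec j 0 (l.length + 3) (by omega)
        (by rw [hm]; omega)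
      rw [h0] at hr
      exact hr
    have hAside : kernel_endpoint s
        = (match pvFinish (pvSeq l j) (pvS l j) with
           | some r => String.ofList r
           | none => "") := by
      rw [kernel_endpoint, ← hl, hrun]
    have hslice : PySem.List.slice (pvSeq l j) (some (st : Int)) none = cycL := by
      have h1 : ((List.range j).map (pvS l)).drop st = ((List.range j).drop st).map (pvS l) :=
        Eq.symm List.map_drop
      have h2 : (List.range j).drop st = List.range' st p := by
        rw [List.range_eq_range', List.drop_range']
        simp [hp]
      rw [PySem.List.slice_from_natCast, pvSeq, h1, h2]
    have hcyclen : cycL.length = p := by simp [hcycL]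
    by_cases hab : a = b
    · -- constant limit: the cycle is the single string X
      have hYX : Y = X := by rw [hX, hY, hab]
      have hcyc1 : cycL = [X] := by
        rcases hhc : cycL with _ | ⟨c, rest⟩
        · rw [hhc] at hXmem; cases hXmem
        · have hcX : c = X := by
            rcases hsub c (by rw [hhc]; exact List.mem_cons_self) with h' | h'
            · exact h'
            · rw [h', hYX]
          rcases rest with _ | ⟨r, rest'⟩
          · rw [hcX]
          · exfalso
            have hrX : r = X := by
              rcases hsub r (by rw [hhc]; simp) with h' | h'
              · exact h'
              · rw [h', hYX]
            rw [hhc] at hnodup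
            have hnm := (List.nodup_cons.mp hnodup).1
            apply hnm
            rw [hcX, ← hrX]
            exact List.mem_cons_self
      have hfin : pvFinish (pvSeq l j) (pvS l j) = some X := by
        rw [pvFinish_some _ _ st hst, hslice, hcyc1]
        simp [PySem.List.pyGet?, PySem.List.pyIdx?]
      have hBside : kernel_endpoint_alt s = String.ofList (List.replicate l.length a) := by
        simp only [kernel_endpoint_alt, ← hl]
        rw [if_neg (by omega), if_neg (by omega)]
        have hdiv : l.length / 2 = m := by omega
        rw [hdiv, ← ha, ← hb, if_pos hab]
      rw [hAside, hfin, hBside, hX, ← hab, pvAlt_self, hm]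
    · -- two-cycle: the cycle is {X, Y}
      have hXY : X ≠ Y := by
        intro hcontra
        have h0 : (pvAlt b a (2 * m)).getD 0 ' ' = (pvAlt a b (2 * m)).getD 0 ' ' := by
          rw [← hX, ← hY, hcontra]
        rw [pvAlt_getD _ _ _ 0 (by omega), pvAlt_getD _ _ _ 0 (by omega)] at h0
        simp at h0
        exact hab h0.symm
      have hcyc2 : cycL = [X, Y] ∨ cycL = [Y, X] :=
        pair_list X Y cycL hnodup hsub hXmem hYmem hXY
      have hsorted : PySem.List.sorted cycL (fun z => z) false
          = PySem.List.sorted [X, Y] (fun z => z) false := by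
        rcases hcyc2 with hc | hc
        · rw [hc]
        · rw [hc, sorted_pair_comm Y X (Ne.symm hXY)]
      have hlen2 : cycL.length = 2 := by rcases hcyc2 with hc | hc <;> simp [hc]
      have hfin : pvFinish (pvSeq l j) (pvS l j)
          = some (PySem.Chars.join ['<','-','>']
              (PySem.List.sorted [X, Y] (fun z => z) false)) := by
        rw [pvFinish_some _ _ st hst, hslice, if_neg (by rw [hlen2]; omega), hsorted]
      have hBside : kernel_endpoint_alt s
          = String.ofList (PySem.Chars.join ['<','-','>']
              (PySem.List.sorted [X, Y] (fun z => z) false)) := by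
        simp only [kernel_endpoint_alt, ← hl]
        rw [if_neg (by omega), if_neg (by omega)]
        have hdiv : l.length / 2 = m := by omega
        rw [hdiv, ← ha, ← hb, if_neg hab, pyRepeat_alt, pyRepeat_alt, ← hX, ← hY]
      rw [hAside, hfin, hBside]
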